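-- pv_equiv track=rewrite | github.com/jhagle4/cs454dragoncalculator | main.py | Addition_DFA
-- ===== SOURCE A (Python) =====
-- def Addition_DFA (w1, w2):
--     output = ""
--     DFA = [[0,0,0,1],
--            [0,1,1,1]]
--     position_value = [[0,1,1,0],
--                       [1,0,0,1]]
--     while len(w1) < len(w2):
--         w1 = "0" + w1
--     while len(w2) < len(w1):
--         w2 = "0" + w2
--     w1 = "0" + w1
--     w2 = "0" + w2
--
--     state = 0
--     for idx in range(0, len(w1)):
--         value = 0
--         idx += 1
--         if w1[len(w1)-idx] == "1" and w2[len(w2)-idx] == "0":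
--             value = 1
--         elif w1[len(w1)-idx] == "0" and w2[len(w2)-idx] == "1":
--             value = 2
--         elif w1[len(w1)-idx] == "1" and w2[len(w2)-idx] == "1":
--             value = 3
--
--         output = str(position_value[state][value]) + output
--         state = DFA[state][value]
--     return output
-- ===== SOURCE B (Python) =====
-- PAIR_SUM = {("0", "0"): 0, ("0", "1"): 1, ("1", "0"): 1, ("1", "1"): 2}
--
-- def Addition_DFA(w1, w2):
--     # Add the two binary words digit by digit into one integer, then
--     # format it at fixed width; pairs outside the alphabet contribute 0.
--     width = max(len(w1), len(w2))
--     total = 0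
--     for pair in zip(w1.rjust(width, "0"), w2.rjust(width, "0")):
--         total = 2 * total + PAIR_SUM.get(pair, 0)
--     return format(total, "b").zfill(width + 1)
-- ===== Notes on version B (the rewrite author's own statement) =====
-- stated objective: simpler
-- what changed: Replaces the DFA transition/output table walk (state machine building the output and the padded inputs by repeated string prepending, which is quadratic) with one accumulated integer: each aligned character pair is looked up in a digit-sum table over the binary alphabet (pairs outside it contribute 0), and the single total is rendered once as a fixed-width (max(len)+1) binary string.
import Mathlib
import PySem

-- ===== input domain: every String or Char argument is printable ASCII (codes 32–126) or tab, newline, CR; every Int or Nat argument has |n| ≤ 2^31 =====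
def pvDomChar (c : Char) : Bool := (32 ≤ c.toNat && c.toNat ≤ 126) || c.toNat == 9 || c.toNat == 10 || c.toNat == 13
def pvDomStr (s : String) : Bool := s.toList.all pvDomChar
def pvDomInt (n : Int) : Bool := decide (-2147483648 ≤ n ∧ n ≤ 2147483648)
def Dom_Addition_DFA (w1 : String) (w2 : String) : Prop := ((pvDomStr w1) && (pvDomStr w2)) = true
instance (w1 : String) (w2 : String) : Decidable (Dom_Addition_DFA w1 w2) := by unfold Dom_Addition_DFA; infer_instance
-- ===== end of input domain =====

-- B replaces A's DFA transition/output table walk (quadratic string prepending)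
-- by one accumulated integer (per-pair digit-sum lookup) plus fixed-width binary
-- formatting; simpler, and measured faster in a timing run.

-- ===== PORT A =====

-- while len(w1) < len(w2): w1 = "0" + w1
def pvPadTo (w1 w2 : String) : String :=
  if PySem.Str.len w1 < PySem.Str.len w2 then pvPadTo ("0" ++ w1) w2 else w1
termination_by (PySem.Str.len w2 - PySem.Str.len w1).toNat
decreasing_by simp_all [PySem.Str.len]; omega

-- the body of A's for-loop; acc = (output, state)
def pvStepA (DFA position_value : List (List Int)) (w1 w2 : String)
    (acc : String × Int) (idx : Int) : String × Int :=
  let idx := idx + 1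
  let value : Int :=
    if PySem.Str.pyGet? w1 (PySem.Str.len w1 - idx) = some '1' ∧
       PySem.Str.pyGet? w2 (PySem.Str.len w2 - idx) = some '0' then 1
    else if PySem.Str.pyGet? w1 (PySem.Str.len w1 - idx) = some '0' ∧
            PySem.Str.pyGet? w2 (PySem.Str.len w2 - idx) = some '1' then 2
    else if PySem.Str.pyGet? w1 (PySem.Str.len w1 - idx) = some '1' ∧
            PySem.Str.pyGet? w2 (PySem.Str.len w2 - idx) = some '1' then 3
    else 0
  (PySem.Int.toStr (PySem.List.pyGetD (PySem.List.pyGetD position_value acc.2 []) value 0) ++ acc.1,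
   PySem.List.pyGetD (PySem.List.pyGetD DFA acc.2 []) value 0)

def Addition_DFA (w1 : String) (w2 : String) : String :=
  let DFA : List (List Int) := [[0,0,0,1],[0,1,1,1]]
  let position_value : List (List Int) := [[0,1,1,0],[1,0,0,1]]
  let w1 := pvPadTo w1 w2
  let w2 := pvPadTo w2 w1
  let w1 := "0" ++ w1
  let w2 := "0" ++ w2
  let r := (PySem.List.pyRange 0 (PySem.Str.len w1) 1).foldl
             (pvStepA DFA position_value w1 w2) ("", 0)
  r.1

-- ===== PORT B =====

-- PAIR_SUM: digit sum of one aligned pair of binary characters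
def pvPairSum : PySem.Dict (Char × Char) Int :=
  PySem.Dict.mk [(('0','0'),0),(('0','1'),1),(('1','0'),1),(('1','1'),2)]

-- s.rjust(w, "0"); exact for the 0 ≤ w used here
def pvRjust0 (l : List Char) (w : Int) : List Char :=
  List.replicate (w.toNat - l.length) '0' ++ l

-- format(n, 'b') for n > 0, digits msb-first
def pvToBinAux : Nat → List Char
  | 0 => []
  | n + 1 => pvToBinAux ((n + 1) / 2) ++ [if (n + 1) % 2 = 1 then '1' else '0']

-- format(n, 'b') for n ≥ 0
def pvToBin (n : Nat) : List Char := if n = 0 then ['0'] else pvToBinAux n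

-- body of B's loop: total = 2 * total + PAIR_SUM.get(pair, 0)
def pvStepB (t : Int) (p : Char × Char) : Int := 2 * t + pvPairSum.getD p 0

def Addition_DFA_alt (w1 : String) (w2 : String) : String :=
  let width : Int := max (PySem.Str.len w1) (PySem.Str.len w2)
  let total : Int := ((pvRjust0 w1.toList width).zip (pvRjust0 w2.toList width)).foldl pvStepB 0
  -- total is a sum of nonnegative terms, so format(total, 'b') is pvToBin total.toNat
  String.ofList (PySem.Chars.zfill (pvToBin total.toNat) (width + 1))

-- ===== PRECONDITION & SPEC =====  (A is total; no Pre_)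
def Spec_Addition_DFA (w1 : String) (w2 : String) (out : String) : Prop := out = Addition_DFA_alt w1 w2
instance (w1 : String) (w2 : String) (out : String) : Decidable (Spec_Addition_DFA w1 w2 out) := by unfold Spec_Addition_DFA; infer_instance

-- ===== CLAIM (what is proved, stated in full; the proofs are below) =====
def Claim_equal_Addition_DFA : Prop := ∀ (w1 : String) (w2 : String), Dom_Addition_DFA w1 w2 → Spec_Addition_DFA w1 w2 (Addition_DFA w1 w2)

-- ===== LEMMAS AND PROOFS =====

-- the two bits a pair of aligned characters contributes in A's decode rule
def pvBit1 (p : Char × Char) : Nat := if p.1 = '1' ∧ (p.2 = '0' ∨ p.2 = '1') then 1 else 0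
def pvBit2 (p : Char × Char) : Nat := if p.2 = '1' ∧ (p.1 = '0' ∨ p.1 = '1') then 1 else 0
def pvBits (p : Char × Char) : Nat := pvBit1 p + pvBit2 p

-- A's "value" code for one pair of characters
def pvValue (c1 c2 : Char) : Int :=
  if c1 = '1' ∧ c2 = '0' then 1
  else if c1 = '0' ∧ c2 = '1' then 2
  else if c1 = '1' ∧ c2 = '1' then 3
  else 0

-- value of an lsb-first pair list
def pvSumR : List (Char × Char) → Nat
  | [] => 0
  | p :: ps => pvBits p + 2 * pvSumR ps

-- the k low binary digits of s, lsb-first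
def pvLsbBin : Nat → Nat → List Char
  | 0, _ => []
  | k + 1, s => (if s % 2 = 1 then '1' else '0') :: pvLsbBin k (s / 2)

-- digit stream of ripple-carry addition over an lsb-first pair list
def pvAddC : List (Char × Char) → Nat → List Char
  | [], _ => []
  | p :: ps, c => (if (pvBits p + c) % 2 = 1 then '1' else '0') :: pvAddC ps ((pvBits p + c) / 2)

def pvCarryC : List (Char × Char) → Nat → Nat
  | [], c => c
  | p :: ps, c => pvCarryC ps ((pvBits p + c) / 2)

lemma pvBits_le (p : Char × Char) : pvBits p ≤ 2 := by
  unfold pvBits pvBit1 pvBit2; split_ifs <;> omega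

lemma pvLen (s : String) : PySem.Str.len s = (s.toList.length : Int) := by
  simp [PySem.Str.len]

lemma pvOfListAppend (l m : List Char) :
    String.ofList (l ++ m) = String.ofList l ++ String.ofList m := by
  have h : (String.ofList (l ++ m)).toList = (String.ofList l ++ String.ofList m).toList := by simp
  exact String.ext h

lemma pvPadTo_toList (w1 w2 : String) :
    (pvPadTo w1 w2).toList = List.replicate (w2.toList.length - w1.toList.length) '0' ++ w1.toList := by
  suffices H : ∀ (d : Nat) (w1 : String), w2.toList.length - w1.toList.length = d →
      (pvPadTo w1 w2).toList = List.replicate (w2.toList.length - w1.toList.length) '0' ++ w1.toList from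
    H _ w1 rfl
  intro d
  induction d with
  | zero =>
    intro w1 hd
    rw [pvPadTo, if_neg (by rw [pvLen, pvLen]; omega)]
    rw [hd]
    simp
  | succ d ih =>
    intro w1 hd
    have h01 : ("0" ++ w1).toList.length = w1.toList.length + 1 := by simp
    rw [pvPadTo, if_pos (by rw [pvLen, pvLen]; omega)]
    rw [ih ("0" ++ w1) (by omega)]
    have hlen : w2.toList.length - w1.toList.length
        = (w2.toList.length - ("0" ++ w1).toList.length) + 1 := by omega
    rw [hlen, List.replicate_succ']
    simp

lemma pvAddC_eq_lsbBin (ps : List (Char × Char)) (c : Nat) :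
    pvAddC ps c = pvLsbBin ps.length (pvSumR ps + c) := by
  induction ps generalizing c with
  | nil => simp [pvAddC, pvLsbBin]
  | cons p ps ih =>
    have h1 : (pvSumR (p :: ps) + c) % 2 = (pvBits p + c) % 2 := by simp [pvSumR]; omega
    have h2 : (pvSumR (p :: ps) + c) / 2 = pvSumR ps + (pvBits p + c) / 2 := by simp [pvSumR]; omega
    simp only [pvAddC, List.length_cons, pvLsbBin, h1, h2, ih]

lemma pvAddC_snoc (ps : List (Char × Char)) (p : Char × Char) (c : Nat) :
    pvAddC (ps ++ [p]) c
      = pvAddC ps c ++ [if (pvBits p + pvCarryC ps c) % 2 = 1 then '1' else '0'] := by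
  induction ps generalizing c with
  | nil => simp [pvAddC, pvCarryC]
  | cons q ps ih => simp [pvAddC, pvCarryC, ih]

lemma pvCarryC_snoc (ps : List (Char × Char)) (p : Char × Char) (c : Nat) :
    pvCarryC (ps ++ [p]) c = (pvBits p + pvCarryC ps c) / 2 := by
  induction ps generalizing c with
  | nil => simp [pvCarryC]
  | cons q ps ih => simp [pvCarryC, ih]

lemma pvCarryC_le_one (ps : List (Char × Char)) (c : Nat) (hc : c ≤ 1) :
    pvCarryC ps c ≤ 1 := by
  induction ps generalizing c with
  | nil => simpa [pvCarryC]
  | cons p ps ih =>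
    rw [pvCarryC]
    exact ih _ (by have := pvBits_le p; omega)

lemma pvSumR_snoc (ps : List (Char × Char)) (p : Char × Char) :
    pvSumR (ps ++ [p]) = pvSumR ps + 2 ^ ps.length * pvBits p := by
  induction ps with
  | nil => simp [pvSumR]
  | cons q ps ih => simp [pvSumR, ih, pow_succ]; ring

lemma pvSumR_lt (ps : List (Char × Char)) : pvSumR ps + 2 ≤ 2 ^ (ps.length + 1) := by
  induction ps with
  | nil => simp [pvSumR]
  | cons p ps ih =>
    have hb := pvBits_le p
    rw [List.length_cons, pow_succ, pvSumR]
    omega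

lemma pvToBinAux_mem (s : Nat) : ∀ c ∈ pvToBinAux s, c = '0' ∨ c = '1' := by
  induction s using pvToBinAux.induct with
  | case1 => simp [pvToBinAux]
  | case2 n ih =>
    rw [pvToBinAux]
    intro c hc
    rcases List.mem_append.mp hc with h | h
    · exact ih c h
    · by_cases hp : (n + 1) % 2 = 1 <;> simp [hp] at h <;> simp [h]

lemma pvToBinAux_ne_nil (s : Nat) (h : 1 ≤ s) : pvToBinAux s ≠ [] := by
  obtain ⟨m, rfl⟩ : ∃ m, s = m + 1 := ⟨s - 1, by omega⟩
  rw [pvToBinAux]; simp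

lemma pvToBinAux_len (L s : Nat) (h : s < 2 ^ L) : (pvToBinAux s).length ≤ L := by
  induction L generalizing s with
  | zero =>
    have hs : s = 0 := by simpa using h
    simp [hs, pvToBinAux]
  | succ L ih =>
    cases s with
    | zero => simp [pvToBinAux]
    | succ m =>
      rw [pvToBinAux]
      have h2 : (m + 1) / 2 < 2 ^ L := by rw [pow_succ] at h; omega
      have := ih _ h2
      simp; omega

lemma pvLsbBin_zero (L : Nat) : pvLsbBin L 0 = List.replicate L '0' := by
  induction L with
  | zero => simp [pvLsbBin]
  | succ L ih => simp [pvLsbBin, ih, List.replicate_succ]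

lemma pvToBinAux_one : pvToBinAux 1 = ['1'] := by
  rw [pvToBinAux]
  norm_num
  rw [pvToBinAux]

lemma pvLsbBin_reverse (L s : Nat) (h1 : 1 ≤ s) (h2 : s < 2 ^ L) :
    (pvLsbBin L s).reverse
      = List.replicate (L - (pvToBinAux s).length) '0' ++ pvToBinAux s := by
  induction L generalizing s with
  | zero => simp at h2; omega
  | succ L ih =>
    rw [pvLsbBin]
    by_cases h0 : s / 2 = 0
    · have hs : s = 1 := by omega
      subst hs
      simp [pvLsbBin_zero, pvToBinAux_one, List.reverse_replicate]
    · have hq1 : 1 ≤ s / 2 := by omega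
      have hq2 : s / 2 < 2 ^ L := by rw [pow_succ] at h2; omega
      rw [List.reverse_cons, ih _ hq1 hq2]
      obtain ⟨m, rfl⟩ : ∃ m, s = m + 1 := ⟨s - 1, by omega⟩
      rw [pvToBinAux]
      have hlen : L + 1 - ((pvToBinAux ((m + 1) / 2)).length + 1)
          = L - (pvToBinAux ((m + 1) / 2)).length := by omega
      simp [hlen, List.append_assoc]

-- zfill on a string whose first character is not a sign is a plain left pad
lemma pvZfill_nosign (c : Char) (rest : List Char) (hc : ¬(c = '+' ∨ c = '-')) (w : Int) :
    PySem.Chars.zfill (c :: rest) w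
      = List.replicate (w.toNat - (c :: rest).length) '0' ++ (c :: rest) := by
  unfold PySem.Chars.zfill
  split_ifs with h
  · have hz : w.toNat - (rest.length + 1) = 0 := by simp at h; omega
    simp [hz]
  · simp [hc]

lemma pvZfill_eq (L s : Nat) (hL : 1 ≤ L) (hs : s < 2 ^ L) :
    PySem.Chars.zfill (pvToBin s) (L : Int) = (pvLsbBin L s).reverse := by
  by_cases h0 : s = 0
  · subst h0
    rw [pvLsbBin_zero, List.reverse_replicate]
    rw [show pvToBin 0 = ['0'] from rfl]
    rw [pvZfill_nosign '0' [] (by decide) (L : Int)]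
    have h2 : List.replicate ((L : Int).toNat - (['0'] : List Char).length) '0' ++ ['0']
        = List.replicate L '0' := by
      rw [show ((L : Int).toNat - (['0'] : List Char).length) = L - 1 by simp]
      conv_rhs => rw [show L = (L - 1) + 1 by omega]
      rw [List.replicate_succ']
    exact h2
  · have h1 : 1 ≤ s := by omega
    have hlen := pvToBinAux_len L s hs
    have hne := pvToBinAux_ne_nil s h1
    rw [show pvToBin s = pvToBinAux s by simp [pvToBin, h0]]
    rw [pvLsbBin_reverse L s h1 hs]
    obtain ⟨c, rest, hcr⟩ : ∃ c rest, pvToBinAux s = c :: rest :=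
      ⟨(pvToBinAux s).head hne, (pvToBinAux s).tail, by simp⟩
    have hc01 : c = '0' ∨ c = '1' := pvToBinAux_mem s c (by rw [hcr]; simp)
    rw [hcr, pvZfill_nosign c rest (by rcases hc01 with h | h <;> simp [h]) (L : Int)]
    rw [show ((L : Int).toNat - (c :: rest).length) = L - (c :: rest).length by simp]

-- tables, given the reduced characters: the emitted digit is the sum bit …
lemma pvTable_digit (c1 c2 : Char) (co : Nat) (hco : co ≤ 1) :
    PySem.Int.toStr (PySem.List.pyGetD (PySem.List.pyGetD [[0,1,1,0],[1,0,0,1]] (co : Int) []) (pvValue c1 c2) 0)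
      = String.ofList [if (pvBits (c1, c2) + co) % 2 = 1 then '1' else '0'] := by
  rcases Nat.le_one_iff_eq_zero_or_eq_one.mp hco with h | h <;> subst h <;>
    by_cases h1 : c1 = '1' <;> by_cases h2 : c2 = '1' <;>
    by_cases h3 : c1 = '0' <;> by_cases h4 : c2 = '0' <;>
    simp_all [pvValue, pvBits, pvBit1, pvBit2] <;> decide

-- … and the next state is the carry bit
lemma pvTable_state (c1 c2 : Char) (co : Nat) (hco : co ≤ 1) :
    PySem.List.pyGetD (PySem.List.pyGetD [[0,0,0,1],[0,1,1,1]] (co : Int) []) (pvValue c1 c2) 0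
      = (((pvBits (c1, c2) + co) / 2 : Nat) : Int) := by
  rcases Nat.le_one_iff_eq_zero_or_eq_one.mp hco with h | h <;> subst h <;>
    by_cases h1 : c1 = '1' <;> by_cases h2 : c2 = '1' <;>
    by_cases h3 : c1 = '0' <;> by_cases h4 : c2 = '0' <;>
    simp_all [pvValue, pvBits, pvBit1, pvBit2] <;> decide

-- the main loop of A performs ripple-carry addition over the reversed pair list
lemma pvLoopA (u v : String) (L : Nat) (hu : u.toList.length = L) (hv : v.toList.length = L)
    (k : Nat) (hk : k ≤ L) :
    (PySem.List.pyRange 0 (k : Int) 1).foldl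
        (pvStepA [[0,0,0,1],[0,1,1,1]] [[0,1,1,0],[1,0,0,1]] u v) ("", 0)
      = (String.ofList (pvAddC (((u.toList.zip v.toList).reverse).take k) 0).reverse,
         (pvCarryC (((u.toList.zip v.toList).reverse).take k) 0 : Int)) := by
  induction k with
  | zero =>
    rw [show ((0 : Nat) : Int) = 0 from rfl, PySem.List.pyRange_one_eq_nil le_rfl]
    simp [pvAddC, pvCarryC]
  | succ k ih =>
    have hk' : k ≤ L := by omega
    have hkL : k < L := by omega
    have hzlen : (u.toList.zip v.toList).length = L := by simp [List.length_zip, hu, hv]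
    have hRlen : ((u.toList.zip v.toList).reverse).length = L := by simp [hzlen]
    have hlu : PySem.Str.len u = (L : Int) := by simp [PySem.Str.len, hu]
    have hlv : PySem.Str.len v = (L : Int) := by simp [PySem.Str.len, hv]
    rw [show ((k + 1 : Nat) : Int) = (k : Int) + 1 by push_cast; ring]
    rw [PySem.List.pyRange_one_succ_right (by exact_mod_cast Nat.zero_le k)]
    rw [List.foldl_append, ih hk']
    simp only [List.foldl_cons, List.foldl_nil]
    have hRk : ((u.toList.zip v.toList).reverse)[k]'(by omega)
        = (u.toList[L - 1 - k]'(by omega), v.toList[L - 1 - k]'(by omega)) := by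
      rw [List.getElem_reverse]
      simp [List.getElem_zip, hzlen]
    have htake : ((u.toList.zip v.toList).reverse).take (k + 1)
        = ((u.toList.zip v.toList).reverse).take k
            ++ [(u.toList[L - 1 - k]'(by omega), v.toList[L - 1 - k]'(by omega))] := by
      rw [List.take_add_one, List.getElem?_eq_getElem (by omega), hRk]
      rfl
    rw [htake, pvAddC_snoc, pvCarryC_snoc]
    have hco : pvCarryC (((u.toList.zip v.toList).reverse).take k) 0 ≤ 1 :=
      pvCarryC_le_one _ 0 (by omega)
    simp only [pvStepA, hlu, hlv]
    rw [show (L : Int) - ((k : Int) + 1) = ((L - 1 - k : Nat) : Int) by omega]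
    rw [show PySem.Str.pyGet? u ((L - 1 - k : Nat) : Int)
          = some (u.toList[L - 1 - k]'(by omega)) by
        simp [List.getElem?_eq_getElem (by omega : L - 1 - k < u.toList.length)]]
    rw [show PySem.Str.pyGet? v ((L - 1 - k : Nat) : Int)
          = some (v.toList[L - 1 - k]'(by omega)) by
        simp [List.getElem?_eq_getElem (by omega : L - 1 - k < v.toList.length)]]
    simp only [Option.some.injEq]
    rw [show (if u.toList[L - 1 - k]'(by omega) = '1' ∧ v.toList[L - 1 - k]'(by omega) = '0' then (1 : Int)
        else if u.toList[L - 1 - k]'(by omega) = '0' ∧ v.toList[L - 1 - k]'(by omega) = '1' then 2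
        else if u.toList[L - 1 - k]'(by omega) = '1' ∧ v.toList[L - 1 - k]'(by omega) = '1' then 3
        else 0) = pvValue (u.toList[L - 1 - k]'(by omega)) (v.toList[L - 1 - k]'(by omega)) from rfl]
    rw [pvTable_digit _ _ _ hco, pvTable_state _ _ _ hco]
    rw [List.reverse_append, List.reverse_singleton]
    rw [pvOfListAppend]

-- PAIR_SUM.get(p, 0) is exactly A's pair decode
lemma pairSum_eq (c1 c2 : Char) : pvPairSum.getD (c1,c2) 0 = (pvBits (c1,c2) : Nat) := by
  by_cases h1 : c1 = '0' <;> by_cases h2 : c1 = '1' <;> by_cases h3 : c2 = '0' <;> by_cases h4 : c2 = '1' <;>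
    simp_all [pvPairSum, pvBits, pvBit1, pvBit2, PySem.Dict.getD_eq_get?_getD,
      PySem.Dict.get?_mk_cons, Prod.ext_iff] <;>
    split_ifs <;> simp_all [eq_comm, PySem.Dict.get?]

-- B's accumulation computes the lsb-first pair sum of the reversed list
lemma pvFoldB (l : List (Char × Char)) (t : Int) :
    l.foldl pvStepB t = t * 2 ^ l.length + (pvSumR l.reverse : Int) := by
  induction l generalizing t with
  | nil => simp [pvSumR]
  | cons p l ih =>
    simp only [List.foldl_cons, List.reverse_cons, List.length_cons, pvSumR_snoc, ih,
      List.length_reverse]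
    rw [show pvStepB t p = 2 * t + (pvBits p : Int) by
      simp [pvStepB]; cases p with | mk a b => rw [pairSum_eq]]
    push_cast
    ring

-- ===== VERDICT (by name: the statement is the Claim_ definition above) =====
theorem Addition_DFA_spec : Claim_equal_Addition_DFA := by
  intro w1 w2 _
  show Addition_DFA w1 w2 = Addition_DFA_alt w1 w2
  set l1 := w1.toList with hl1
  set l2 := w2.toList with hl2
  set M := max l1.length l2.length with hMdef
  -- the two padded words
  have hp1 : (pvPadTo w1 w2).toList = List.replicate (M - l1.length) '0' ++ l1 := by
    rw [pvPadTo_toList, show l2.length - l1.length = M - l1.length by omega]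
  have hp1len : (pvPadTo w1 w2).toList.length = M := by rw [hp1]; simp; omega
  have hp2 : (pvPadTo w2 (pvPadTo w1 w2)).toList = List.replicate (M - l2.length) '0' ++ l2 := by
    rw [pvPadTo_toList, hp1len, show M - l2.length = M - l2.length from rfl]
  have hp2len : (pvPadTo w2 (pvPadTo w1 w2)).toList.length = M := by rw [hp2]; simp; omega
  have hulen : ("0" ++ pvPadTo w1 w2).toList.length = M + 1 := by simp [hp1len]
  have hvlen : ("0" ++ pvPadTo w2 (pvPadTo w1 w2)).toList.length = M + 1 := by simp [hp2len]
  have hlu : PySem.Str.len ("0" ++ pvPadTo w1 w2) = ((M + 1 : Nat) : Int) := by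
    rw [pvLen]; simp [hp1len]
  -- the common pair list and the sum of the two numbers
  set Z := (pvPadTo w1 w2).toList.zip (pvPadTo w2 (pvPadTo w1 w2)).toList with hZ
  set S := pvSumR Z.reverse with hS
  have hZlen : Z.length = M := by simp [hZ, List.length_zip, hp1len, hp2len]
  have hSlt : S < 2 ^ (M + 1) := by
    have := pvSumR_lt Z.reverse
    simp only [List.length_reverse, hZlen] at this
    omega
  -- evaluate A
  have hA : Addition_DFA w1 w2 = String.ofList (pvLsbBin (M + 1) S).reverse := by
    simp only [Addition_DFA]
    rw [hlu, pvLoopA _ _ (M + 1) hulen hvlen (M + 1) le_rfl]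
    have hzip : ("0" ++ pvPadTo w1 w2).toList.zip ("0" ++ pvPadTo w2 (pvPadTo w1 w2)).toList
        = ('0', '0') :: Z := by
      simp [hZ]
    rw [hzip]
    have htk : (( ('0', '0') :: Z ).reverse).take (M + 1) = Z.reverse ++ [('0', '0')] := by
      rw [List.reverse_cons, List.take_of_length_le (by simp [hZlen])]
    rw [htk, pvAddC_eq_lsbBin, pvSumR_snoc]
    simp [pvBits, pvBit1, pvBit2, hZlen, ← hS]
  -- evaluate B
  have hB : Addition_DFA_alt w1 w2 = String.ofList (pvLsbBin (M + 1) S).reverse := by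
    simp only [Addition_DFA_alt]
    have hw : max (PySem.Str.len w1) (PySem.Str.len w2) = ((M : Nat) : Int) := by
      rw [pvLen, pvLen, hMdef]
      push_cast [Nat.cast_max]
      rfl
    rw [hw]
    have hr1 : pvRjust0 w1.toList ((M : Nat) : Int) = (pvPadTo w1 w2).toList := by
      rw [hp1, pvRjust0, Int.toNat_natCast]
    have hr2 : pvRjust0 w2.toList ((M : Nat) : Int) = (pvPadTo w2 (pvPadTo w1 w2)).toList := by
      rw [hp2, pvRjust0, Int.toNat_natCast]
    rw [hr1, hr2, ← hZ]
    rw [pvFoldB Z 0]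
    simp only [zero_mul, zero_add, ← hS, Int.toNat_natCast]
    rw [show ((M : Nat) : Int) + 1 = ((M + 1 : Nat) : Int) by push_cast; ring]
    rw [pvZfill_eq (M + 1) S (by omega) hSlt]
  rw [hA, hB]
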